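-- pv_equiv track=rewrite | github.com/ZhangWY0724/apitest | backend/services.py | filter_accounts
-- ===== SOURCE A (Python) =====
-- from typing import Any, Iterable
--
-- def filter_accounts(
--     accounts: list[dict[str, Any]],
--     keyword: str = "",
--     channel: str = "",
--     status: str = "",
-- ) -> list[dict[str, Any]]:
--     normalized_keyword = keyword.strip().lower()
--
--     def matches(account: dict[str, Any]) -> bool:
--         name = str(account.get("name") or "").lower()
--         current_channel = str(account.get("channel") or "")
--         current_status = str(account.get("status") or "")
--
--         keyword_hit = (
--             not normalized_keyword
--             or normalized_keyword in name
--             or normalized_keyword in current_channel.lower()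
--             or normalized_keyword in current_status.lower()
--         )
--         channel_hit = not channel or current_channel == channel
--         status_hit = not status or current_status == status
--         return keyword_hit and channel_hit and status_hit
--
--     return [account for account in accounts if matches(account)]
-- ===== SOURCE B (Python) =====
-- def filter_accounts(
--     accounts,
--     keyword: str = "",
--     channel: str = "",
--     status: str = "",
-- ):
--     def field(account, key):
--         return str(account.get(key) or "")
--
--     result = accounts
--     if channel:
--         result = [a for a in result if field(a, "channel") == channel]
--     if status:
--         result = [a for a in result if field(a, "status") == status]
--     nk = keyword.strip().lower()
--     if nk:
--         result = [
--             a for a in result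
--             if nk in field(a, "name").lower()
--             or nk in field(a, "channel").lower()
--             or nk in field(a, "status").lower()
--         ]
--     return result
-- ===== Notes on version B (the rewrite author's own statement) =====
-- stated objective: alternative
-- what changed: Replaces the single comprehension with one conjoined matches() predicate by a pipeline of up to three successive filtering passes (channel, then status, then keyword), each stage scanning only the survivors of the previous one.
import Mathlib
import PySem

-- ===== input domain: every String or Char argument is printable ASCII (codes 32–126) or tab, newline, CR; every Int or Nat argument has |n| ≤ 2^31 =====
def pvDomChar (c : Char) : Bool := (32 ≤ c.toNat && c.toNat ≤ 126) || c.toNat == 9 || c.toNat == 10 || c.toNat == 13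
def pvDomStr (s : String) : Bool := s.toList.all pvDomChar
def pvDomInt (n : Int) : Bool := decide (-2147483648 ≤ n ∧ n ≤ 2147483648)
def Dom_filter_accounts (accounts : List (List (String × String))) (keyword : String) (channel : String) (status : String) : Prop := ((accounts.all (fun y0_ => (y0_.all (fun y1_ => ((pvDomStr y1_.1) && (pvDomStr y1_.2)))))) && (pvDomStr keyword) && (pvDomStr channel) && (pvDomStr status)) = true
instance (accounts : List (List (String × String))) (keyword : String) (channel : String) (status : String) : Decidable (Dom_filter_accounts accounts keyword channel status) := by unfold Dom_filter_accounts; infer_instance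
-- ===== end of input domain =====

-- B replaces the single conjoined-predicate comprehension by a pipeline of successive filter passes (channel, status, keyword); equal cost, different decomposition.


-- ===== PORT A =====
def pvGetA (account : List (String × String)) (key : String) : String :=
  ((account.find? (fun p => p.1 == key)).map (·.2)).getD ""

def pvMatchesA (nk : String) (channel : String) (status : String) (account : List (String × String)) : Bool :=
  let name := PySem.Str.lower (pvGetA account "name")
  let currentChannel := pvGetA account "channel"
  let currentStatus := pvGetA account "status"
  let keywordHit := nk == "" || PySem.Str.isIn nk name
      || PySem.Str.isIn nk (PySem.Str.lower currentChannel)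
      || PySem.Str.isIn nk (PySem.Str.lower currentStatus)
  let channelHit := channel == "" || currentChannel == channel
  let statusHit := status == "" || currentStatus == status
  keywordHit && channelHit && statusHit

def filter_accounts (accounts : List (List (String × String))) (keyword : String) (channel : String) (status : String) : List (List (String × String)) :=
  let normalizedKeyword := PySem.Str.lower (PySem.Str.strip keyword)
  accounts.filter (pvMatchesA normalizedKeyword channel status)

-- ===== PORT B =====  (field lookup 'str(account.get(k) or "")' is the same one-liner in both Pythons: shared helper pvGetA)
def filter_accounts_alt (accounts : List (List (String × String))) (keyword : String) (channel : String) (status : String) : List (List (String × String)) :=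
  let r0 := accounts
  let r1 := if channel ≠ "" then r0.filter (fun a => pvGetA a "channel" == channel) else r0
  let r2 := if status ≠ "" then r1.filter (fun a => pvGetA a "status" == status) else r1
  let nk := PySem.Str.lower (PySem.Str.strip keyword)
  if nk ≠ "" then
    r2.filter (fun a =>
      PySem.Str.isIn nk (PySem.Str.lower (pvGetA a "name"))
      || PySem.Str.isIn nk (PySem.Str.lower (pvGetA a "channel"))
      || PySem.Str.isIn nk (PySem.Str.lower (pvGetA a "status")))
  else r2

-- ===== PRECONDITION & SPEC =====
def Spec_filter_accounts (accounts : List (List (String × String))) (keyword : String) (channel : String) (status : String) (out : List (List (String × String))) : Prop := out = filter_accounts_alt accounts keyword channel status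
instance (accounts : List (List (String × String))) (keyword : String) (channel : String) (status : String) (out : List (List (String × String))) : Decidable (Spec_filter_accounts accounts keyword channel status out) := by unfold Spec_filter_accounts; infer_instance

-- ===== CLAIM (what is proved, stated in full; the proofs are below) =====
def Claim_equal_filter_accounts : Prop := ∀ (accounts : List (List (String × String))) (keyword : String) (channel : String) (status : String), Dom_filter_accounts accounts keyword channel status → Spec_filter_accounts accounts keyword channel status (filter_accounts accounts keyword channel status)

-- ===== LEMMAS AND PROOFS =====
lemma pv_pipeline (accounts : List (List (String × String))) (keyword channel status : String) :
    filter_accounts accounts keyword channel status = filter_accounts_alt accounts keyword channel status := by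
  unfold filter_accounts filter_accounts_alt pvMatchesA pvGetA
  by_cases hc : channel = "" <;> by_cases hs : status = "" <;>
      by_cases hk : PySem.Str.lower (PySem.Str.strip keyword) = "" <;>
    simp only [hc, hs, hk, ne_eq, not_true_eq_false, not_false_eq_true,
      if_true, if_false, List.filter_filter]
  · rw [List.filter_eq_self]; intro a _
    simp only [beq_self_eq_true, Bool.true_or, Bool.and_self]
  · refine List.filter_congr fun a _ => Bool.eq_iff_iff.mpr ?_
    simp only [Bool.and_eq_true, Bool.or_eq_true, beq_iff_eq, hk, true_or, and_true, false_or]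
  · refine List.filter_congr fun a _ => Bool.eq_iff_iff.mpr ?_
    simp only [Bool.and_eq_true, Bool.or_eq_true, beq_iff_eq, hs, true_or,
      true_and, and_true, false_or]
  · refine List.filter_congr fun a _ => Bool.eq_iff_iff.mpr ?_
    simp only [Bool.and_eq_true, Bool.or_eq_true, beq_iff_eq, hs, hk, true_or, and_true, false_or]
  · refine List.filter_congr fun a _ => Bool.eq_iff_iff.mpr ?_
    simp only [Bool.and_eq_true, Bool.or_eq_true, beq_iff_eq, hc, true_or,
      true_and, and_true, false_or]
  · refine List.filter_congr fun a _ => Bool.eq_iff_iff.mpr ?_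
    simp only [Bool.and_eq_true, Bool.or_eq_true, beq_iff_eq, hc, hk, true_or, and_true, false_or]
  · refine List.filter_congr fun a _ => Bool.eq_iff_iff.mpr ?_
    simp only [Bool.and_eq_true, Bool.or_eq_true, beq_iff_eq, hc, hs, true_or,
      true_and, false_or]
    exact and_comm
  · refine List.filter_congr fun a _ => Bool.eq_iff_iff.mpr ?_
    simp only [Bool.and_eq_true, Bool.or_eq_true, beq_iff_eq, hc, hs, hk, false_or]
    rw [and_assoc]
    exact and_congr_right fun _ => and_comm

-- ===== VERDICT (by name: the statement is the Claim_ definition above) =====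
theorem filter_accounts_spec : Claim_equal_filter_accounts := by
  intro accounts keyword channel status _
  unfold Spec_filter_accounts
  exact pv_pipeline accounts keyword channel status
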